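-- pv_equiv track=rewrite | github.com/projeto-de-algoritmos-2024/Greed_AgendadorClinica | main.py | particionar_intervalos
-- ===== SOURCE A (Python) =====
-- def particionar_intervalos(consultas):
--     consultas_ordenadas = sorted(consultas, key=lambda x: x[1])
--     salas = []
--
--     for consulta in consultas_ordenadas:
--         alocada = False
--         for sala in salas:
--             if sala[-1][1] <= consulta[0]:
--                 sala.append(consulta)
--                 alocada = True
--                 break
--         if not alocada:
--             salas.append([consulta])
--
--     return salas
-- ===== SOURCE B (Python) =====
-- def particionar_intervalos(consultas):
--     restantes = sorted(consultas, key=lambda x: x[1])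
--     salas = []
--     while restantes:
--         sala = [restantes[0]]
--         fim = restantes[0][1]
--         pulados = []
--         for c in restantes[1:]:
--             if fim <= c[0]:
--                 sala.append(c)
--                 fim = c[1]
--             else:
--                 pulados.append(c)
--         salas.append(sala)
--         restantes = pulados
--     return salas
-- ===== Notes on version B (the rewrite author's own statement) =====
-- stated objective: alternative
-- what changed: Instead of scanning all existing rooms for each appointment (first-fit), B repeatedly peels from the end-sorted list the greedy compatible chain that first-fit would give to the next room, building the rooms one at a time.
import Mathlib
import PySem

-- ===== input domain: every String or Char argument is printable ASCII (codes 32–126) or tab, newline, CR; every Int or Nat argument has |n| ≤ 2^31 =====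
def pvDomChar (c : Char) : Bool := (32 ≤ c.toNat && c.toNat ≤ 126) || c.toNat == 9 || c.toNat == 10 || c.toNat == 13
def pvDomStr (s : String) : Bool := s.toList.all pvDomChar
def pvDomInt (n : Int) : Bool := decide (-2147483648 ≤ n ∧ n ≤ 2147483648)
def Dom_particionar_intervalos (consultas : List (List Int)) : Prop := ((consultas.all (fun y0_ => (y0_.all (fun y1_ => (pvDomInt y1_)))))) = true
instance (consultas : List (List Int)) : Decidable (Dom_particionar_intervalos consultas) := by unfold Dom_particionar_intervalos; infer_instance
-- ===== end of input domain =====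

-- B replaces A's per-appointment scan over all existing rooms by peeling one room's
-- greedy chain per pass from the sorted list (objective: alternative decomposition).

-- ===== PORT A =====
-- sala[-1][1] and consulta[0]/consulta[1] are ported with pyGetD (total form);
-- exact on Pre_ (every inner list has length ≥ 2; salas entries are always nonempty).
def pvPlace (salas : List (List (List Int))) (c : List Int) : Option (List (List (List Int))) :=
  match salas with
  | [] => none
  | s :: rest =>
      if PySem.List.pyGetD (PySem.List.pyGetD s (-1) []) 1 0 ≤ PySem.List.pyGetD c 0 0 then
        some ((s ++ [c]) :: rest)
      else (pvPlace rest c).map (fun l => s :: l)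

def particionar_intervalos (consultas : List (List Int)) : List (List (List Int)) :=
  let ordenadas := PySem.List.sorted consultas (fun x => PySem.List.pyGetD x 1 0) false
  ordenadas.foldl (fun salas c => (pvPlace salas c).getD (salas ++ [[c]])) []

-- ===== PORT B =====
-- pvChain is the inner 'for c in restantes[1:]' loop of Source B: it returns the room's
-- chain continuation (sala tail) and the skipped appointments (pulados), in order.
def pvChain (fim : Int) (xs : List (List Int)) : List (List Int) × List (List Int) :=
  match xs with
  | [] => ([], [])
  | c :: rest =>
      if fim ≤ PySem.List.pyGetD c 0 0 then
        let p := pvChain (PySem.List.pyGetD c 1 0) rest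
        (c :: p.1, p.2)
      else
        let p := pvChain fim rest
        (p.1, c :: p.2)

theorem pvChain_snd_length_le (fim : Int) (xs : List (List Int)) :
    (pvChain fim xs).2.length ≤ xs.length := by
  induction xs generalizing fim with
  | nil => simp [pvChain]
  | cons c rest ih =>
      simp only [pvChain]
      split
      · exact le_trans (ih _) (Nat.le_succ _)
      · simpa using Nat.succ_le_succ (ih fim)

-- the outer 'while restantes' loop of Source B
def pvPeel (xs : List (List Int)) : List (List (List Int)) :=
  match xs with
  | [] => []
  | c :: rest =>
      let p := pvChain (PySem.List.pyGetD c 1 0) rest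
      (c :: p.1) :: pvPeel p.2
termination_by xs.length
decreasing_by
  simpa using Nat.lt_succ_of_le (pvChain_snd_length_le _ rest)

def particionar_intervalos_alt (consultas : List (List Int)) : List (List (List Int)) :=
  pvPeel (PySem.List.sorted consultas (fun x => PySem.List.pyGetD x 1 0) false)

-- ===== PRECONDITION & SPEC =====
-- Pre_ excludes exactly the inputs on which Python A raises IndexError
-- (some appointment list has fewer than 2 elements).
def Pre_particionar_intervalos (consultas : List (List Int)) : Prop :=
  ∀ c ∈ consultas, 2 ≤ c.length
instance (consultas : List (List Int)) : Decidable (Pre_particionar_intervalos consultas) := by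
  unfold Pre_particionar_intervalos; infer_instance

def pvWitness_particionar_intervalos : List (List Int) := [[1, 3], [0, 2], [3, 5]]

def Spec_particionar_intervalos (consultas : List (List Int)) (out : List (List (List Int))) : Prop := out = particionar_intervalos_alt consultas
instance (consultas : List (List Int)) (out : List (List (List Int))) : Decidable (Spec_particionar_intervalos consultas out) := by unfold Spec_particionar_intervalos; infer_instance

-- ===== CLAIM (what is proved, stated in full; the proofs are below) =====
def Claim_equal_particionar_intervalos : Prop := ∀ (consultas : List (List Int)), Dom_particionar_intervalos consultas → Pre_particionar_intervalos consultas → Spec_particionar_intervalos consultas (particionar_intervalos consultas)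

-- ===== LEMMAS AND PROOFS =====

-- A's per-appointment step, named for the proofs (defeq to the lambda in port A)
def pvStep (salas : List (List (List Int))) (c : List Int) : List (List (List Int)) :=
  (pvPlace salas c).getD (salas ++ [[c]])

-- sala[-1][1], named for the proofs
def pvLastEnd (s : List (List Int)) : Int :=
  PySem.List.pyGetD (PySem.List.pyGetD s (-1) []) 1 0

theorem pvStep_cons (s : List (List Int)) (rest : List (List (List Int))) (c : List Int) :
    pvStep (s :: rest) c =
      if pvLastEnd s ≤ PySem.List.pyGetD c 0 0 then (s ++ [c]) :: rest
      else s :: pvStep rest c := by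
  simp only [pvStep, pvPlace, pvLastEnd]
  split
  · rfl
  · cases pvPlace rest c <;> simp

theorem pvLastEnd_append (s : List (List Int)) (c : List Int) :
    pvLastEnd (s ++ [c]) = PySem.List.pyGetD c 1 0 := by
  simp [pvLastEnd, PySem.List.pyGetD_neg_one_append_singleton]

-- the key decomposition: folding first-fit over a state whose first room is s
-- appends the greedy chain to s and processes the skipped appointments on the rest
theorem pvFold_cons (xs : List (List Int)) (s : List (List Int))
    (rest : List (List (List Int))) :
    xs.foldl pvStep (s :: rest) =
      (s ++ (pvChain (pvLastEnd s) xs).1) ::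
        ((pvChain (pvLastEnd s) xs).2.foldl pvStep rest) := by
  induction xs generalizing s rest with
  | nil => simp [pvChain]
  | cons c xs ih =>
      simp only [List.foldl_cons, pvStep_cons, pvChain]
      by_cases h : pvLastEnd s ≤ PySem.List.pyGetD c 0 0
      · simp only [if_pos h]
        rw [ih]
        simp [pvLastEnd_append]
      · simp only [if_neg h]
        rw [ih]
        simp

theorem pvFold_eq_peel (xs : List (List Int)) : xs.foldl pvStep [] = pvPeel xs := by
  induction hn : xs.length using Nat.strong_induction_on generalizing xs with
  | _ n ih =>
      cases xs with
      | nil => simp [pvPeel]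
      | cons c xs =>
          have hstep : pvStep [] c = [[c]] := rfl
          simp only [List.foldl_cons, hstep, pvPeel]
          rw [pvFold_cons]
          have he : pvLastEnd [c] = PySem.List.pyGetD c 1 0 := by
            simpa using pvLastEnd_append [] c
          rw [he]
          refine congrArg _ ?_
          exact ih _ (by subst hn; simpa using
            Nat.lt_succ_of_le (pvChain_snd_length_le (PySem.List.pyGetD c 1 0) xs)) _ rfl

-- ===== VERDICT (by name: the statement is the Claim_ definition above) =====
theorem particionar_intervalos_spec : Claim_equal_particionar_intervalos := by
  intro consultas _ _
  unfold Spec_particionar_intervalos particionar_intervalos particionar_intervalos_alt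
  exact pvFold_eq_peel _
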